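-- pv_equiv track=rewrite | github.com/maartyman/shift-code-manager | scripts/release.py | _commit_category
-- ===== SOURCE A (Python) =====
-- from typing import Dict, Iterable, List, Optional, Sequence, Tuple
--
-- _CATEGORY_PREFIXES: Dict[str, Sequence[str]] = {
--     "Features": ("feat", "feature"),
--     "Fixes": ("fix", "hotfix", "bug"),
--     "Chore": ("chore", "build", "ci", "docs", "doc", "refactor", "style", "perf", "test", "tests"),
--     "Other": tuple(),
-- }
--
-- def _commit_category(summary: str) -> str:
--     lowered = summary.lower()
--     for category, prefixes in _CATEGORY_PREFIXES.items():
--         if not prefixes: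
--             continue
--         for prefix in prefixes:
--             if lowered.startswith(prefix + ":") or lowered.startswith(prefix + "(") or lowered.startswith(prefix + " "):
--                 return category
--     return "Other"
-- ===== SOURCE B (Python) =====
-- from typing import Dict, Sequence
--
-- _CATEGORY_PREFIXES: Dict[str, Sequence[str]] = {
--     "Features": ("feat", "feature"),
--     "Fixes": ("fix", "hotfix", "bug"),
--     "Chore": ("chore", "build", "ci", "docs", "doc", "refactor", "style", "perf", "test", "tests"),
--     "Other": tuple(),
-- }
--
-- _PREFIX_TO_CATEGORY = {
--     prefix: category
--     for category, prefixes in _CATEGORY_PREFIXES.items()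
--     for prefix in prefixes
-- }
--
-- def _commit_category(summary: str) -> str:
--     lowered = summary.lower()
--     token = []
--     for ch in lowered:
--         if ch in ":( ":
--             return _PREFIX_TO_CATEGORY.get("".join(token), "Other")
--         token.append(ch)
--     return "Other"
-- ===== Notes on version B (the rewrite author's own statement) =====
-- stated objective: idiomatic
-- what changed: Replaces the nested category/prefix startswith scan (39 string-prefix tests against the summary head) with a single left-to-right parse of the leading token up to the first delimiter character, followed by one lookup in an inverted prefix-to-category dict built once at module load.
import Mathlib
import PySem

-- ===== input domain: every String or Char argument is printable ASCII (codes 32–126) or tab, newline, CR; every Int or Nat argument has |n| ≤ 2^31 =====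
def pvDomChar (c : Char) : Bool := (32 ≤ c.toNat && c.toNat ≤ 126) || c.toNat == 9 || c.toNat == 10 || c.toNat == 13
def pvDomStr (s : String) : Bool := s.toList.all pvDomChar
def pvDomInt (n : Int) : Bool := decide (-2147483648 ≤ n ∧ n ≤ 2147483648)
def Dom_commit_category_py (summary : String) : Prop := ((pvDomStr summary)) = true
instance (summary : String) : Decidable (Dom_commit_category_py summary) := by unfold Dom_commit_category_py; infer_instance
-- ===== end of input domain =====

-- B replaces A's nested category/prefix startswith scan by parsing the token before the
-- first ':', '(' or ' ' and one lookup in an inverted prefix→category table (idiomatic).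

-- ===== PORT A =====
-- the module constant _CATEGORY_PREFIXES (insertion order kept)
def pvCatPrefixes : List (String × List String) :=
  [("Features", ["feat", "feature"]),
   ("Fixes", ["fix", "hotfix", "bug"]),
   ("Chore", ["chore", "build", "ci", "docs", "doc", "refactor", "style", "perf", "test", "tests"]),
   ("Other", [])]

-- inner 'for prefix in prefixes' loop: returns the category on the first match
def pvInnerA (lowered : String) (category : String) : List String → Option String
  | [] => none
  | p :: ps =>
    if PySem.Str.startswith lowered (p ++ ":") || PySem.Str.startswith lowered (p ++ "(")
        || PySem.Str.startswith lowered (p ++ " ") then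
      some category
    else pvInnerA lowered category ps

-- outer 'for category, prefixes in _CATEGORY_PREFIXES.items()' loop
def pvOuterA (lowered : String) : List (String × List String) → String
  | [] => "Other"
  | (category, prefixes) :: rest =>
    if prefixes.isEmpty then pvOuterA lowered rest
    else
      match pvInnerA lowered category prefixes with
      | some c => c
      | none => pvOuterA lowered rest

def commit_category_py (summary : String) : String :=
  pvOuterA (PySem.Str.lower summary) pvCatPrefixes

-- ===== PORT B =====
-- _PREFIX_TO_CATEGORY: the dict comprehension inverting _CATEGORY_PREFIXES
def pvPrefixTable : PySem.Dict String String :=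
  PySem.Dict.ofList (pvCatPrefixes.flatMap (fun cp => cp.2.map (fun p => (p, cp.1))))

-- the 'for ch in lowered' loop; 'ch in ":( "' ported as the three-way comparison (exact)
def pvGoB (token : List Char) : List Char → String
  | [] => "Other"
  | ch :: rest =>
    if ch == ':' || ch == '(' || ch == ' ' then
      pvPrefixTable.getD (String.ofList token) "Other"
    else pvGoB (token ++ [ch]) rest

def commit_category_py_alt (summary : String) : String :=
  pvGoB [] (PySem.Str.lower summary).toList

-- ===== PRECONDITION & SPEC =====
def Spec_commit_category_py (summary : String) (out : String) : Prop := out = commit_category_py_alt summary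
instance (summary : String) (out : String) : Decidable (Spec_commit_category_py summary out) := by unfold Spec_commit_category_py; infer_instance

-- ===== CLAIM (what is proved, stated in full; the proofs are below) =====
def Claim_equal_commit_category_py : Prop := ∀ (summary : String), Dom_commit_category_py summary → Spec_commit_category_py summary (commit_category_py summary)

-- ===== LEMMAS AND PROOFS =====

def pvIsDelim (c : Char) : Bool := c == ':' || c == '(' || c == ' '

theorem pvGoB_eq (L acc : List Char) :
    pvGoB acc L =
      if (L.dropWhile (fun c => !pvIsDelim c)).isEmpty then "Other"
      else pvPrefixTable.getD (String.ofList (acc ++ L.takeWhile (fun c => !pvIsDelim c))) "Other" := by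
  induction L generalizing acc with
  | nil => simp [pvGoB]
  | cons c rest ih =>
    have hcond : (c == ':' || c == '(' || c == ' ') = pvIsDelim c := rfl
    by_cases hc : pvIsDelim c = true
    · rw [pvGoB, hcond, hc, if_pos rfl,
        List.takeWhile_cons_of_neg (by simp [hc]), List.dropWhile_cons_of_neg (by simp [hc])]
      simp
    · have hc' : pvIsDelim c = false := Bool.eq_false_iff.mpr hc
      rw [pvGoB, hcond, hc', if_neg (by simp),
        List.takeWhile_cons_of_pos (by simp [hc']), List.dropWhile_cons_of_pos (by simp [hc']),
        ih (acc ++ [c])]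
      simp

theorem pv_prefix_iff (p : List Char) (hp : p.all (fun c => !pvIsDelim c) = true)
    (d : Char) (hd : pvIsDelim d = true) (L : List Char) :
    (p ++ [d]) <+: L ↔
      p = L.takeWhile (fun c => !pvIsDelim c) ∧
        (L.dropWhile (fun c => !pvIsDelim c)).head? = some d := by
  induction L generalizing p with
  | nil =>
    simp only [List.takeWhile_nil, List.dropWhile_nil, List.head?_nil]
    constructor
    · intro h; exact absurd (List.prefix_nil.mp h) (by simp)
    · rintro ⟨-, h⟩; exact absurd h (by simp)
  | cons c rest ih =>
    by_cases hc : pvIsDelim c = true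
    · rw [List.dropWhile_cons_of_neg (by simp [hc]), List.takeWhile_cons_of_neg (by simp [hc])]
      cases p with
      | nil => simp [List.cons_prefix_cons, eq_comm]
      | cons p0 ps =>
        simp only [List.all_cons, Bool.and_eq_true, Bool.not_eq_true'] at hp
        constructor
        · intro h
          rw [List.cons_append, List.cons_prefix_cons] at h
          exact absurd hc (by rw [← h.1]; simp [hp.1])
        · rintro ⟨h, -⟩; simp at h
    · rw [List.dropWhile_cons_of_pos (by simp [hc]), List.takeWhile_cons_of_pos (by simp [hc])]
      cases p with
      | nil =>
        simp only [List.nil_append, List.nil_eq, List.cons_prefix_cons]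
        constructor
        · rintro ⟨h, -⟩; exact absurd hd (by rw [h]; simp [hc])
        · rintro ⟨h, -⟩; simp at h
      | cons p0 ps =>
        simp only [List.all_cons, Bool.and_eq_true] at hp
        rw [List.cons_append, List.cons_prefix_cons, ih ps hp.2]
        constructor
        · rintro ⟨h1, h2, h3⟩; exact ⟨by rw [h1, h2], h3⟩
        · rintro ⟨h, h3⟩
          rw [List.cons.injEq] at h
          exact ⟨h.1, h.2, h3⟩

theorem pv_head_dropWhile (L : List Char) (d : Char)
    (h : (L.dropWhile (fun c => !pvIsDelim c)).head? = some d) : pvIsDelim d = true := by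
  induction L with
  | nil => simp at h
  | cons c rest ih =>
    by_cases hc : pvIsDelim c = true
    · rw [List.dropWhile_cons_of_neg (by simp [hc])] at h
      simp at h; rwa [← h]
    · rw [List.dropWhile_cons_of_pos (by simp [hc])] at h
      exact ih h

-- A's triple-startswith test for one prefix, characterised via the token/rest split
theorem pv_cond_iff (p : List Char) (hp : p.all (fun c => !pvIsDelim c) = true) (L : List Char) :
    ((p ++ [':']) <+: L ∨ (p ++ ['(']) <+: L ∨ (p ++ [' ']) <+: L) ↔
      p = L.takeWhile (fun c => !pvIsDelim c) ∧ ¬ (L.dropWhile (fun c => !pvIsDelim c)).isEmpty := by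
  rw [pv_prefix_iff p hp ':' (by decide) L, pv_prefix_iff p hp '(' (by decide) L,
    pv_prefix_iff p hp ' ' (by decide) L]
  constructor
  · rintro (⟨h1, h2⟩ | ⟨h1, h2⟩ | ⟨h1, h2⟩) <;>
      exact ⟨h1, by cases hL : L.dropWhile (fun c => !pvIsDelim c) <;> simp_all⟩
  · rintro ⟨h1, h2⟩
    cases hL : L.dropWhile (fun c => !pvIsDelim c) with
    | nil => simp [hL] at h2
    | cons d r =>
      have hd : pvIsDelim d = true := pv_head_dropWhile L d (by simp [hL])
      simp only [pvIsDelim, Bool.or_eq_true, beq_iff_eq] at hd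
      rcases hd with (hd | hd) | hd
      · exact Or.inl ⟨h1, by simp [hd]⟩
      · exact Or.inr (Or.inl ⟨h1, by simp [hd]⟩)
      · exact Or.inr (Or.inr ⟨h1, by simp [hd]⟩)

theorem pv_beq (a : String) (t : List Char) : (a == String.ofList t) = decide (t = a.toList) := by
  rcases eq_or_ne t a.toList with h | h
  · rw [h, String.ofList_toList, decide_eq_true rfl, beq_self_eq_true]
  · rw [decide_eq_false h, beq_eq_false_iff_ne]
    intro hc
    exact h (by rw [hc, String.toList_ofList])

-- A's triple startswith test for one prefix, as a boolean over the token/rest split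
theorem pv_condA (s : String) (p : String) (hp : p.toList.all (fun c => !pvIsDelim c) = true) :
    (PySem.Str.startswith s (p ++ ":") || PySem.Str.startswith s (p ++ "(")
        || PySem.Str.startswith s (p ++ " "))
      = (decide (p.toList = s.toList.takeWhile (fun c => !pvIsDelim c))
          && !(s.toList.dropWhile (fun c => !pvIsDelim c)).isEmpty) := by
  have h1 : (":" : String).toList = [':'] := by decide
  have h2 : ("(" : String).toList = ['('] := by decide
  have h3 : (" " : String).toList = [' '] := by decide
  rw [Bool.eq_iff_iff]
  simp only [Bool.or_eq_true, PySem.Str.startswith_eq, PySem.Chars.startswith_iff,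
    String.toList_append, h1, h2, h3, Bool.and_eq_true, decide_eq_true_eq, Bool.not_eq_true',
    List.isEmpty_eq_false_iff]
  rw [or_assoc, pv_cond_iff p.toList hp s.toList]
  simp [List.isEmpty_iff]

theorem pv_main (s : String) : pvOuterA s pvCatPrefixes = pvGoB [] s.toList := by
  rw [pvGoB_eq]
  simp only [pvCatPrefixes, pvOuterA, pvInnerA, List.isEmpty_cons, List.isEmpty_nil]
  rw [pv_condA s "feat" (by decide), pv_condA s "feature" (by decide),
    pv_condA s "fix" (by decide), pv_condA s "hotfix" (by decide),
    pv_condA s "bug" (by decide), pv_condA s "chore" (by decide),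
    pv_condA s "build" (by decide), pv_condA s "ci" (by decide),
    pv_condA s "docs" (by decide), pv_condA s "doc" (by decide),
    pv_condA s "refactor" (by decide), pv_condA s "style" (by decide),
    pv_condA s "perf" (by decide), pv_condA s "test" (by decide),
    pv_condA s "tests" (by decide)]
  generalize s.toList.takeWhile (fun c => !pvIsDelim c) = t
  by_cases he : (s.toList.dropWhile (fun c => !pvIsDelim c)).isEmpty = true
  · simp [he]
  · simp only [Bool.not_eq_true] at he
    simp only [he, Bool.not_false, Bool.and_true]
    by_cases h1 : "feat".toList = t
    · subst h1; decide
    by_cases h2 : "feature".toList = t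
    · subst h2; decide
    by_cases h3 : "fix".toList = t
    · subst h3; decide
    by_cases h4 : "hotfix".toList = t
    · subst h4; decide
    by_cases h5 : "bug".toList = t
    · subst h5; decide
    by_cases h6 : "chore".toList = t
    · subst h6; decide
    by_cases h7 : "build".toList = t
    · subst h7; decide
    by_cases h8 : "ci".toList = t
    · subst h8; decide
    by_cases h9 : "docs".toList = t
    · subst h9; decide
    by_cases h10 : "doc".toList = t
    · subst h10; decide
    by_cases h11 : "refactor".toList = t
    · subst h11; decide
    by_cases h12 : "style".toList = t
    · subst h12; decide
    by_cases h13 : "perf".toList = t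
    · subst h13; decide
    by_cases h14 : "test".toList = t
    · subst h14; decide
    by_cases h15 : "tests".toList = t
    · subst h15; decide
    have htab : pvPrefixTable = PySem.Dict.mk [("feat", "Features"), ("feature", "Features"), ("fix", "Fixes"), ("hotfix", "Fixes"), ("bug", "Fixes"), ("chore", "Chore"), ("build", "Chore"), ("ci", "Chore"), ("docs", "Chore"), ("doc", "Chore"), ("refactor", "Chore"), ("style", "Chore"), ("perf", "Chore"), ("test", "Chore"), ("tests", "Chore")] := by decide
    rw [htab]
    simp only [PySem.Dict.getD, PySem.Dict.get?_mk_cons, pv_beq,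
      decide_eq_false h1, decide_eq_false h2, decide_eq_false h3, decide_eq_false h4, decide_eq_false h5, decide_eq_false h6, decide_eq_false h7, decide_eq_false h8, decide_eq_false h9, decide_eq_false h10, decide_eq_false h11, decide_eq_false h12, decide_eq_false h13, decide_eq_false h14, decide_eq_false h15]
    simp
    rw [if_neg (fun h => h1 ((show "feat".toList = (['f', 'e', 'a', 't'] : List Char) by decide).trans h.symm)),
      if_neg (fun h => h2 ((show "feature".toList = (['f', 'e', 'a', 't', 'u', 'r', 'e'] : List Char) by decide).trans h.symm)),
      if_neg (fun h => h3 ((show "fix".toList = (['f', 'i', 'x'] : List Char) by decide).trans h.symm)),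
      if_neg (fun h => h4 ((show "hotfix".toList = (['h', 'o', 't', 'f', 'i', 'x'] : List Char) by decide).trans h.symm)),
      if_neg (fun h => h5 ((show "bug".toList = (['b', 'u', 'g'] : List Char) by decide).trans h.symm)),
      if_neg (fun h => h6 ((show "chore".toList = (['c', 'h', 'o', 'r', 'e'] : List Char) by decide).trans h.symm)),
      if_neg (fun h => h7 ((show "build".toList = (['b', 'u', 'i', 'l', 'd'] : List Char) by decide).trans h.symm)),
      if_neg (fun h => h8 ((show "ci".toList = (['c', 'i'] : List Char) by decide).trans h.symm)),
      if_neg (fun h => h9 ((show "docs".toList = (['d', 'o', 'c', 's'] : List Char) by decide).trans h.symm)),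
      if_neg (fun h => h10 ((show "doc".toList = (['d', 'o', 'c'] : List Char) by decide).trans h.symm)),
      if_neg (fun h => h11 ((show "refactor".toList = (['r', 'e', 'f', 'a', 'c', 't', 'o', 'r'] : List Char) by decide).trans h.symm)),
      if_neg (fun h => h12 ((show "style".toList = (['s', 't', 'y', 'l', 'e'] : List Char) by decide).trans h.symm)),
      if_neg (fun h => h13 ((show "perf".toList = (['p', 'e', 'r', 'f'] : List Char) by decide).trans h.symm)),
      if_neg (fun h => h14 ((show "test".toList = (['t', 'e', 's', 't'] : List Char) by decide).trans h.symm)),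
      if_neg (fun h => h15 ((show "tests".toList = (['t', 'e', 's', 't', 's'] : List Char) by decide).trans h.symm))]
    rfl

theorem commit_category_py_spec : Claim_equal_commit_category_py := by
  intro summary _
  unfold Spec_commit_category_py commit_category_py commit_category_py_alt
  exact pv_main (PySem.Str.lower summary)
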